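-- pv_equiv track=rewrite | github.com/ljaewon97/Algorithm | Programmers/KAKAO/Level 2/문자열 압축.py | zipString
-- ===== SOURCE A (Python) =====
-- def zipString(s, n):
--     res = ''
--     arr = []
--     for i in range(0, len(s), n):
--         arr.append(s[i:min(i+n, len(s))])
--
--     cur = ''
--     cnt = 0
--     for i in range(len(arr)):
--         if arr[i] != cur:
--             cur = arr[i]
--             cnt = 1
--         else:
--             cnt += 1
--
--         if i == len(arr) -1 or arr[i] != arr[i+1]:
--             if cnt >= 2:
--                 res += str(cnt) + cur
--             else:
--                 res += cur
--
--     return len(res)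
-- ===== SOURCE B (Python) =====
-- def zipString(s, n):
--     # Chunk s into fixed-size blocks, then scan runs of equal blocks and
--     # accumulate the compressed length arithmetically (no string is built).
--     blocks = [s[i:i+n] for i in range(0, len(s), n)]
--     total = 0
--     i = 0
--     while i < len(blocks):
--         j = i + 1
--         while j < len(blocks) and blocks[j] == blocks[i]:
--             j += 1
--         cnt = j - i
--         total += len(blocks[i]) + (len(str(cnt)) if cnt >= 2 else 0)
--         i = j
--     return total
-- ===== Notes on version B (the rewrite author's own statement) =====
-- stated objective: alternative
-- what changed: B never builds the compressed string or a cur/cnt state machine: it chunks once, then scans each maximal run of equal blocks with a lookahead index and accumulates the output length arithmetically (block length plus digit count of the run length).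
import Mathlib
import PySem

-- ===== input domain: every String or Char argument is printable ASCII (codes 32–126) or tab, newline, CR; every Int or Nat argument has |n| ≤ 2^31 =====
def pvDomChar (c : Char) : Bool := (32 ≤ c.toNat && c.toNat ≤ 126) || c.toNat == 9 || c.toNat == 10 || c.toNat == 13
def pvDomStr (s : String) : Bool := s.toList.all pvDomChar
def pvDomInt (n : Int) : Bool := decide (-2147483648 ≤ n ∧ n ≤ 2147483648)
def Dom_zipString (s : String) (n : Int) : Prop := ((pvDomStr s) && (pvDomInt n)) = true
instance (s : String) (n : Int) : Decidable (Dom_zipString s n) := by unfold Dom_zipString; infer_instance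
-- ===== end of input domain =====

-- B computes the compressed length arithmetically by scanning maximal runs of
-- equal blocks, instead of A's single-pass cur/cnt state machine that builds
-- the compressed string and measures it (objective: alternative decomposition).

-- ===== PORT A =====
-- A's second loop: index i becomes structural recursion; arr[i] is the head b,
-- 'i == len(arr)-1 or arr[i] != arr[i+1]' is 'rest.head? ≠ some b'.
def pvLoopA : List String → String → Int → List Char → List Char
  | [], _cur, _cnt, res => res
  | b :: rest, cur, cnt, res =>
    let cur' := if b ≠ cur then b else cur
    let cnt' := if b ≠ cur then 1 else cnt + 1
    let res' :=
      if rest.head? ≠ some b then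
        if cnt' ≥ 2 then res ++ (PySem.Int.toStr cnt').toList ++ cur'.toList
        else res ++ cur'.toList
      else res
    pvLoopA rest cur' cnt' res'

def zipString (s : String) (n : Int) : Int :=
  let arr : List String :=
    (PySem.List.pyRange 0 (PySem.Str.len s) n).foldl
      (fun arr i => arr ++ [PySem.Str.slice s (some i) (some (min (i + n) (PySem.Str.len s)))]) []
  ((pvLoopA arr "" 0 []).length : Int)

-- ===== PORT B =====
-- Source B's inner while loop: length of the run of blocks equal to blocks[i] (= j - i - 1).
def pvRunLen (b : String) : List String → Nat
  | [] => 0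
  | x :: xs => if x = b then pvRunLen b xs + 1 else 0

-- Source B's outer while loop: peel one maximal run (cnt = 1 + run length), add its contribution.
def pvLoopB : List String → Int → Int
  | [], total => total
  | b :: rest, total =>
    pvLoopB (rest.drop (pvRunLen b rest))
      (total + PySem.Str.len b +
        (if (1 + (pvRunLen b rest : Int)) ≥ 2
         then PySem.Str.len (PySem.Int.toStr (1 + (pvRunLen b rest : Int))) else 0))
  termination_by bs _ => bs.length
  decreasing_by simp only [List.length_drop, List.length_cons]; omega

def zipString_alt (s : String) (n : Int) : Int :=
  let blocks : List String :=
    (PySem.List.pyRange 0 (PySem.Str.len s) n).map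
      (fun i => PySem.Str.slice s (some i) (some (i + n)))
  pvLoopB blocks 0

-- ===== PRECONDITION & SPEC =====
-- Pre_ excludes only n = 0, on which Python's range(0, len(s), 0) raises ValueError in A (and in B).
def Pre_zipString (s : String) (n : Int) : Prop := n ≠ 0
instance (s : String) (n : Int) : Decidable (Pre_zipString s n) := by unfold Pre_zipString; infer_instance
def pvWitness_zipString : String × Int := ("aabbaccc", 2)

def Spec_zipString (s : String) (n : Int) (out : Int) : Prop := out = zipString_alt s n
instance (s : String) (n : Int) (out : Int) : Decidable (Spec_zipString s n out) := by unfold Spec_zipString; infer_instance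

-- ===== CLAIM (what is proved, stated in full; the proofs are below) =====
def Claim_equal_zipString : Prop := ∀ (s : String) (n : Int), Dom_zipString s n → Pre_zipString s n → Spec_zipString s n (zipString s n)

-- ===== LEMMAS AND PROOFS =====

-- the characters A appends at a run boundary
def pvEmit (b : String) (m : Int) : List Char :=
  if m ≥ 2 then (PySem.Int.toStr m).toList ++ b.toList else b.toList

-- one step of A's loop (the two branches of the first 'if' collapse: cur' = b either way)
theorem pvLoopA_cons (b : String) (rest : List String) (cur : String) (cnt : Int) (res : List Char) :
    pvLoopA (b :: rest) cur cnt res =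
      pvLoopA rest b (if b = cur then cnt + 1 else 1)
        (if rest.head? = some b then res
         else res ++ pvEmit b (if b = cur then cnt + 1 else 1)) := by
  by_cases h : b = cur
  · subst h; simp [pvLoopA, pvEmit]
    split_ifs <;> simp [List.append_assoc]
  · simp [pvLoopA, pvEmit, h]

theorem pvRunLen_le (b : String) (rest : List String) : pvRunLen b rest ≤ rest.length := by
  induction rest with
  | nil => simp [pvRunLen]
  | cons x xs ih => by_cases h : x = b <;> simp [pvRunLen, h] <;> omega

theorem pvHead_drop_runLen (rest : List String) (b : String) :
    (rest.drop (pvRunLen b rest)).head? ≠ some b := by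
  induction rest with
  | nil => simp [pvRunLen]
  | cons x xs ih =>
    by_cases h : x = b
    · simpa [pvRunLen, h] using ih
    · simp [pvRunLen, h]

-- processing a whole run of b's from state (cur = b, cnt = m)
theorem pvLoopA_run (rest : List String) (b : String) (m : Int) (res : List Char) :
    pvLoopA (b :: rest) b m res =
      pvLoopA (rest.drop (pvRunLen b rest)) b (m + 1 + (pvRunLen b rest : Int))
        (res ++ pvEmit b (m + 1 + (pvRunLen b rest : Int))) := by
  induction rest generalizing m res with
  | nil =>
    rw [pvLoopA_cons, if_pos rfl]
    simp [pvLoopA, pvRunLen]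
  | cons x xs ih =>
    by_cases h : x = b
    · subst h
      rw [pvLoopA_cons, if_pos rfl,
        if_pos (show ((x :: xs : List String)).head? = some x from rfl)]
      rw [ih (m + 1) res]
      rw [show pvRunLen x (x :: xs) = pvRunLen x xs + 1 from by simp [pvRunLen]]
      have hc : m + 1 + ((pvRunLen x xs + 1 : Nat) : Int) = m + 1 + 1 + (pvRunLen x xs : Int) := by
        push_cast; ring
      rw [List.drop_succ_cons, hc]
    · rw [pvLoopA_cons, if_pos rfl,
        if_neg (show ¬ ((x :: xs : List String)).head? = some b from by simp [h])]
      rw [show pvRunLen b (x :: xs) = 0 from by simp [pvRunLen, h]]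
      simp

-- accumulator lemma for B's loop
theorem pvLoopB_acc (N : Nat) (bs : List String) (hN : bs.length ≤ N) (t : Int) :
    pvLoopB bs t = t + pvLoopB bs 0 := by
  induction N generalizing bs t with
  | zero =>
    have : bs = [] := List.length_eq_zero_iff.mp (Nat.le_zero.mp hN)
    subst this; rw [pvLoopB, pvLoopB]; ring
  | succ N ih =>
    match bs with
    | [] => rw [pvLoopB, pvLoopB]; ring
    | b :: rest =>
      have hkle : pvRunLen b rest ≤ rest.length := pvRunLen_le b rest
      have hlen : (rest.drop (pvRunLen b rest)).length ≤ N := by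
        simp only [List.length_drop]
        simp only [List.length_cons] at hN; omega
      rw [pvLoopB, pvLoopB]
      conv_rhs => rw [ih _ hlen]
      rw [ih _ hlen]
      ring

-- main invariant: from a fresh state (cnt = 0, or cur not equal to the next block),
-- A's loop appends exactly pvLoopB bs 0 characters to res.
theorem pvLoopA_length (N : Nat) (bs : List String) (hN : bs.length ≤ N)
    (cur : String) (c : Int) (res : List Char)
    (h : c = 0 ∨ bs.head? ≠ some cur) :
    ((pvLoopA bs cur c res).length : Int) = (res.length : Int) + pvLoopB bs 0 := by
  induction N generalizing bs cur c res with
  | zero =>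
    have : bs = [] := List.length_eq_zero_iff.mp (Nat.le_zero.mp hN)
    subst this; rw [pvLoopB]; simp [pvLoopA]
  | succ N ih =>
    match bs with
    | [] => rw [pvLoopB]; simp [pvLoopA]
    | b :: rest =>
      have hstep : pvLoopA (b :: rest) cur c res = pvLoopA (b :: rest) b 0 res := by
        by_cases hb : b = cur
        · subst hb
          rcases h with h0 | hne
          · subst h0; rfl
          · simp at hne
        · rw [pvLoopA_cons, if_neg hb, pvLoopA_cons b rest b 0, if_pos rfl]
          norm_num
      rw [hstep, pvLoopA_run]
      have hkle : pvRunLen b rest ≤ rest.length := pvRunLen_le b rest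
      have hlen : (rest.drop (pvRunLen b rest)).length ≤ N := by
        simp only [List.length_drop]
        simp only [List.length_cons] at hN; omega
      rw [pvLoopB, pvLoopB_acc N _ hlen]
      rw [ih (rest.drop (pvRunLen b rest)) hlen b _ _ (Or.inr (pvHead_drop_runLen rest b))]
      simp only [pvEmit, PySem.Str.len_eq, List.length_append]
      have hm : (0 : Int) + 1 + (pvRunLen b rest : Int) = 1 + (pvRunLen b rest : Int) := by ring
      rw [hm]
      by_cases h2 : (1 + (pvRunLen b rest : Int)) ≥ 2
      · rw [if_pos h2, if_pos h2]; simp only [List.length_append]; push_cast; ring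
      · rw [if_neg h2, if_neg h2]; push_cast; ring

-- the two chunkings agree: Python slices clamp, so min(i+n, len(s)) is redundant
theorem pvChunks_eq (s : String) (n : Int) (hn : n ≠ 0) :
    (PySem.List.pyRange 0 (PySem.Str.len s) n).foldl
      (fun arr i => arr ++ [PySem.Str.slice s (some i) (some (min (i + n) (PySem.Str.len s)))]) [] =
    (PySem.List.pyRange 0 (PySem.Str.len s) n).map
      (fun i => PySem.Str.slice s (some i) (some (i + n))) := by
  rw [PySem.List.foldl_append_singleton_eq_map, List.nil_append]
  rcases lt_trichotomy n 0 with hneg | h0 | hpos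
  · -- negative step: range(0, len(s), n) is empty since len(s) ≥ 0
    have hrange : PySem.List.pyRange 0 (PySem.Str.len s) n = [] := by
      have hlen : (0 : Int) ≤ PySem.Str.len s := by
        rw [PySem.Str.len_eq]; positivity
      simp only [PySem.List.pyRange]
      rw [if_neg hn, if_neg (by omega : ¬ (0:Int) < n), if_neg (by omega : ¬ PySem.Str.len s < 0)]
      simp
    rw [hrange]; rfl
  · exact absurd h0 hn
  · apply List.map_congr_left
    intro i hi
    obtain ⟨h0i, hiL, -⟩ := (PySem.List.mem_pyRange_iff_of_pos hpos i).mp hi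
    rw [PySem.Str.len_eq] at hiL
    have h0in : (0 : Int) ≤ i + n := by omega
    have h0min : (0 : Int) ≤ min (i + n) (PySem.Str.len s) := by
      rw [PySem.Str.len_eq]
      have : (0:Int) ≤ (s.toList.length : Int) := by positivity
      omega
    simp only [PySem.Str.slice, PySem.Chars.slice]
    congr 1
    rw [PySem.List.slice_toNat _ h0i h0min, PySem.List.slice_toNat _ h0i h0in]
    apply List.take_eq_take_iff.mpr
    simp only [List.length_drop]
    rw [PySem.Str.len_eq]
    omega

-- ===== VERDICT (by name: the statement is the Claim_ definition above) =====
theorem zipString_spec : Claim_equal_zipString := by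
  unfold Claim_equal_zipString
  intro s n _hDom hPre
  unfold Spec_zipString zipString zipString_alt
  dsimp only
  rw [pvChunks_eq s n hPre]
  have := pvLoopA_length
    ((PySem.List.pyRange 0 (PySem.Str.len s) n).map
      (fun i => PySem.Str.slice s (some i) (some (i + n)))).length _ le_rfl "" 0 [] (Or.inl rfl)
  simpa using this
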